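-- pv_equiv track=rewrite | github.com/miliar/Code_Jam_Webscraper | solutions_python/Problem_201/2928.py | find_closest_left_right
-- ===== SOURCE A (Python) =====
-- def find_closest_left_right(stalls, my_stall):
--     closest_left = 0
--     closest_right = my_stall
--
--     for index in range(len(stalls)):
--         if index < my_stall and stalls[index] == 1:
--             closest_left = index
--         elif index > my_stall and stalls[index] == 1:
--             closest_right = index
--             break
--
--     return closest_left, closest_right
-- ===== SOURCE B (Python) =====
-- def find_closest_left_right(stalls, my_stall):
--     n = len(stalls)
--     closest_left = 0
--     for i in range(min(my_stall, n) - 1, -1, -1):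
--         if stalls[i] == 1:
--             closest_left = i
--             break
--     closest_right = my_stall
--     for i in range(max(my_stall + 1, 0), n):
--         if stalls[i] == 1:
--             closest_right = i
--             break
--     return closest_left, closest_right
-- ===== Notes on version B (the rewrite author's own statement) =====
-- stated objective: alternative
-- what changed: Replaces A's single full forward scan (which keeps overwriting closest_left and breaks on the first right hit) with two independent directional scans that each break on the first occupied stall: a backward scan from my_stall-1 for the left neighbour and a forward scan from my_stall+1 for the right neighbour.
import Mathlib
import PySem

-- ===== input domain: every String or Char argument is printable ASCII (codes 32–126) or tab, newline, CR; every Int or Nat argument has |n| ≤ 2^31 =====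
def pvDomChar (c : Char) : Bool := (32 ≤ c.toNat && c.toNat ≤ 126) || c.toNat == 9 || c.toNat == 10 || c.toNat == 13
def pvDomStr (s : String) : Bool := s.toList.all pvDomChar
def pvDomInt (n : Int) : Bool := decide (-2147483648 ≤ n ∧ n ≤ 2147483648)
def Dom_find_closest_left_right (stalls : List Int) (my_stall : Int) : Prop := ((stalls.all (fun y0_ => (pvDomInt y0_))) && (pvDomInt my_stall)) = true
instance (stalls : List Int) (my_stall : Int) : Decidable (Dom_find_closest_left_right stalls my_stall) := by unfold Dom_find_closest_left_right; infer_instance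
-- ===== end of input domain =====

-- B replaces A's single full forward scan with two independent directional scans
-- (backward from my_stall-1, forward from my_stall+1), each breaking on the first
-- occupied stall; objective: alternative decomposition, same O(n) cost.

-- ===== PORT A =====
-- one combined forward loop over range(len(stalls)): keep overwriting closest_left
-- below my_stall, break on the first hit above my_stall
def pvLoopA (stalls : List Int) (my_stall : Int) : List Int → Int → Int → Int × Int
  | [], cl, cr => (cl, cr)
  | i :: rest, cl, cr =>
    if i < my_stall ∧ PySem.List.pyGet? stalls i = some 1 then
      pvLoopA stalls my_stall rest i cr
    else if my_stall < i ∧ PySem.List.pyGet? stalls i = some 1 then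
      (cl, i)
    else
      pvLoopA stalls my_stall rest cl cr

def find_closest_left_right (stalls : List Int) (my_stall : Int) : Int × Int :=
  pvLoopA stalls my_stall (PySem.List.pyRange 0 (stalls.length : Int) 1) 0 my_stall

-- ===== PORT B =====
-- backward scan for the left neighbour, break (return) on the first hit, default 0
def pvLeftScan (stalls : List Int) : List Int → Int
  | [] => 0
  | i :: rest => if PySem.List.pyGet? stalls i = some 1 then i else pvLeftScan stalls rest

-- forward scan for the right neighbour, break on the first hit, default my_stall
def pvRightScan (stalls : List Int) (my_stall : Int) : List Int → Int
  | [] => my_stall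
  | i :: rest => if PySem.List.pyGet? stalls i = some 1 then i else pvRightScan stalls my_stall rest

def find_closest_left_right_alt (stalls : List Int) (my_stall : Int) : Int × Int :=
  (pvLeftScan stalls (PySem.List.pyRange (min my_stall (stalls.length : Int) - 1) (-1) (-1)),
   pvRightScan stalls my_stall (PySem.List.pyRange (max (my_stall + 1) 0) (stalls.length : Int) 1))

-- ===== PRECONDITION & SPEC =====
def Spec_find_closest_left_right (stalls : List Int) (my_stall : Int) (out : Int × Int) : Prop := out = find_closest_left_right_alt stalls my_stall
instance (stalls : List Int) (my_stall : Int) (out : Int × Int) : Decidable (Spec_find_closest_left_right stalls my_stall out) := by unfold Spec_find_closest_left_right; infer_instance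

-- ===== CLAIM (what is proved, stated in full; the proofs are below) =====
def Claim_equal_find_closest_left_right : Prop := ∀ (stalls : List Int) (my_stall : Int), Dom_find_closest_left_right stalls my_stall → Spec_find_closest_left_right stalls my_stall (find_closest_left_right stalls my_stall)

-- ===== LEMMAS AND PROOFS =====

-- Boolean "stall i is occupied" predicate, for find?
def pvHitB (stalls : List Int) (i : Int) : Bool := decide (PySem.List.pyGet? stalls i = some 1)

lemma pvLeftScan_eq_find? (stalls : List Int) (L : List Int) :
    pvLeftScan stalls L = (L.find? (pvHitB stalls)).getD 0 := by
  induction L with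
  | nil => rfl
  | cons i rest ih =>
    by_cases h : PySem.List.pyGet? stalls i = some 1 <;>
      simp [pvLeftScan, List.find?, pvHitB, h, ih]

lemma pvRightScan_eq_find? (stalls : List Int) (my_stall : Int) (L : List Int) :
    pvRightScan stalls my_stall L = (L.find? (pvHitB stalls)).getD my_stall := by
  induction L with
  | nil => rfl
  | cons i rest ih =>
    by_cases h : PySem.List.pyGet? stalls i = some 1 <;>
      simp [pvRightScan, List.find?, pvHitB, h, ih]

-- A's loop on a tail whose indices are all above my_stall: first hit, else cr
lemma pvLoopA_hi (stalls : List Int) (my_stall : Int) (L : List Int)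
    (hL : ∀ i ∈ L, my_stall < i) :
    ∀ cl cr, pvLoopA stalls my_stall L cl cr = (cl, (L.find? (pvHitB stalls)).getD cr) := by
  induction L with
  | nil => intro cl cr; rfl
  | cons i rest ih =>
    intro cl cr
    have hi : my_stall < i := hL i (by simp)
    have hrest : ∀ j ∈ rest, my_stall < j := fun j hj => hL j (by simp [hj])
    by_cases h : PySem.List.pyGet? stalls i = some 1
    · simp [pvLoopA, h, hi, not_lt_of_gt hi, List.find?, pvHitB]
    · simp [pvLoopA, h, List.find?, pvHitB, ih hrest]

-- A's loop on a prefix whose indices are all ≤ my_stall: never breaks, folds closest_left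
lemma pvLoopA_lo (stalls : List Int) (my_stall : Int) (L : List Int)
    (hL : ∀ i ∈ L, i ≤ my_stall) :
    ∀ R cl cr, pvLoopA stalls my_stall (L ++ R) cl cr =
      pvLoopA stalls my_stall R
        (L.foldl (fun a i => if i < my_stall ∧ PySem.List.pyGet? stalls i = some 1 then i else a) cl) cr := by
  induction L with
  | nil => intro R cl cr; rfl
  | cons i rest ih =>
    intro R cl cr
    have hi : i ≤ my_stall := hL i (by simp)
    have hrest : ∀ j ∈ rest, j ≤ my_stall := fun j hj => hL j (by simp [hj])
    by_cases h : PySem.List.pyGet? stalls i = some 1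
    · by_cases h2 : i < my_stall
      · simp [pvLoopA, h, h2, List.foldl, ih hrest]
      · simp [pvLoopA, h, h2, not_lt_of_ge hi, List.foldl, ih hrest]
    · simp [pvLoopA, h, List.foldl, ih hrest]

-- a fold segment whose indices are all ≥ my_stall changes nothing
lemma pvFold_skip (stalls : List Int) (my_stall : Int) (L : List Int)
    (hL : ∀ i ∈ L, ¬ i < my_stall) :
    ∀ d, L.foldl (fun a i => if i < my_stall ∧ PySem.List.pyGet? stalls i = some 1 then i else a) d = d := by
  induction L with
  | nil => intro d; rfl
  | cons i rest ih =>
    intro d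
    have hi : ¬ i < my_stall := hL i (by simp)
    have hrest : ∀ j ∈ rest, ¬ j < my_stall := fun j hj => hL j (by simp [hj])
    simp [List.foldl, hi, ih hrest]

-- forward "last hit" fold = backward "first hit", on indices all below my_stall
lemma pvFold_eq_find_reverse (stalls : List Int) (my_stall : Int) (L : List Int)
    (hL : ∀ i ∈ L, i < my_stall) :
    ∀ d, L.foldl (fun a i => if i < my_stall ∧ PySem.List.pyGet? stalls i = some 1 then i else a) d =
      (L.reverse.find? (pvHitB stalls)).getD d := by
  induction L with
  | nil => intro d; rfl
  | cons i rest ih =>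
    intro d
    have hi : i < my_stall := hL i (by simp)
    have hrest : ∀ j ∈ rest, j < my_stall := fun j hj => hL j (by simp [hj])
    have happ : (i :: rest).reverse = rest.reverse ++ [i] := by simp
    rw [happ, List.find?_append]
    by_cases h : PySem.List.pyGet? stalls i = some 1
    · simp [List.foldl, hi, h, ih hrest, pvHitB]
    · simp [List.foldl, hi, h, ih hrest, pvHitB]

-- ===== VERDICT (by name: the statement is the Claim_ definition above) =====
theorem find_closest_left_right_spec : Claim_equal_find_closest_left_right := by
  intro stalls my_stall _
  unfold Spec_find_closest_left_right find_closest_left_right find_closest_left_right_alt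
  set n : Int := (stalls.length : Int) with hn
  have hn0 : 0 ≤ n := by positivity
  set m : Int := max 0 (min (my_stall + 1) n) with hm
  set m' : Int := max 0 (min my_stall n) with hm'
  -- split A's range at m
  have hsplit : PySem.List.pyRange 0 n 1 =
      PySem.List.pyRange 0 m 1 ++ PySem.List.pyRange m n 1 :=
    PySem.List.pyRange_one_append 0 m n (by omega) (by omega)
  have hlo : ∀ i ∈ PySem.List.pyRange 0 m 1, i ≤ my_stall := by
    intro i hi; rw [PySem.List.mem_pyRange_one] at hi; omega
  have hhi : ∀ i ∈ PySem.List.pyRange m n 1, my_stall < i := by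
    intro i hi; rw [PySem.List.mem_pyRange_one] at hi; omega
  rw [hsplit, pvLoopA_lo stalls my_stall _ hlo, pvLoopA_hi stalls my_stall _ hhi]
  -- split the lo fold at m'
  have hsplit2 : PySem.List.pyRange 0 m 1 =
      PySem.List.pyRange 0 m' 1 ++ PySem.List.pyRange m' m 1 :=
    PySem.List.pyRange_one_append 0 m' m (by omega) (by omega)
  have hmid : ∀ i ∈ PySem.List.pyRange m' m 1, ¬ i < my_stall := by
    intro i hi; rw [PySem.List.mem_pyRange_one] at hi; omega
  have hlo' : ∀ i ∈ PySem.List.pyRange 0 m' 1, i < my_stall := by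
    intro i hi; rw [PySem.List.mem_pyRange_one] at hi; omega
  rw [hsplit2, List.foldl_append, pvFold_skip stalls my_stall _ hmid,
      pvFold_eq_find_reverse stalls my_stall _ hlo']
  -- B's two ranges coincide with the pieces
  have hbl : PySem.List.pyRange (min my_stall n - 1) (-1) (-1) =
      (PySem.List.pyRange 0 m' 1).reverse := by
    rw [PySem.List.pyRange_neg_one_eq_reverse]
    have : min my_stall n - 1 + 1 = min my_stall n := by ring
    rw [this]
    by_cases h : 0 ≤ min my_stall n
    · have : m' = min my_stall n := by omega
      rw [this]; norm_num
    · rw [PySem.List.pyRange_one_eq_nil (by omega), PySem.List.pyRange_one_eq_nil (by omega)]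
  have hbr : PySem.List.pyRange (max (my_stall + 1) 0) n 1 = PySem.List.pyRange m n 1 := by
    by_cases h : my_stall + 1 ≤ n
    · have : max (my_stall + 1) 0 = m := by omega
      rw [this]
    · rw [PySem.List.pyRange_one_eq_nil (by omega), PySem.List.pyRange_one_eq_nil (by omega)]
  rw [pvLeftScan_eq_find? , pvRightScan_eq_find?, hbl, hbr]
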